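-- pv_equiv track=rewrite | github.com/alberto-santini/covid-optimisation | swab-tests-data/italy-case-study/instance-generator.py | get_fac_lab_compatible
-- ===== SOURCE A (Python) =====
-- def get_fac_lab_compatible(nfac, lcf, inst_type):
--     """ Factory-to-lab reagent delivery map.
--     """
--
--     d = list()
--
--     for fac in range(nfac):
--         if inst_type == 'regional':
--             row = list()
--
--             for lab, cfac in enumerate(lcf):
--                 if cfac == fac:
--                     row.append(1)
--                 else:
--                     row.append(0)
--
--             d.append(row)
--         else:
--             d.append([1] * len(lcf))
--
--     return d
-- ===== SOURCE B (Python) =====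
-- def get_fac_lab_compatible(nfac, lcf, inst_type):
--     """ Factory-to-lab reagent delivery map.
--
--     Builds the matrix by scattering each lab's 1 into a preallocated zero
--     matrix in one pass over the labs, instead of testing every (fac, lab) cell.
--     """
--     if inst_type == 'regional':
--         nrows = max(nfac, 0)
--         d = [[0] * len(lcf) for _ in range(nrows)]
--         for lab, cfac in enumerate(lcf):
--             if 0 <= cfac < nfac:
--                 d[cfac][lab] = 1
--         return d
--     return [[1] * len(lcf) for _ in range(nfac)]
-- ===== Notes on version B (the rewrite author's own statement) =====
-- stated objective: alternative
-- what changed: Replaces A's nested per-cell loops (every factory x every lab, testing cfac == fac) with a preallocated zero matrix and a single pass over the labs that scatters each 1 into row cfac, guarded by 0 <= cfac < nfac.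
import Mathlib
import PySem

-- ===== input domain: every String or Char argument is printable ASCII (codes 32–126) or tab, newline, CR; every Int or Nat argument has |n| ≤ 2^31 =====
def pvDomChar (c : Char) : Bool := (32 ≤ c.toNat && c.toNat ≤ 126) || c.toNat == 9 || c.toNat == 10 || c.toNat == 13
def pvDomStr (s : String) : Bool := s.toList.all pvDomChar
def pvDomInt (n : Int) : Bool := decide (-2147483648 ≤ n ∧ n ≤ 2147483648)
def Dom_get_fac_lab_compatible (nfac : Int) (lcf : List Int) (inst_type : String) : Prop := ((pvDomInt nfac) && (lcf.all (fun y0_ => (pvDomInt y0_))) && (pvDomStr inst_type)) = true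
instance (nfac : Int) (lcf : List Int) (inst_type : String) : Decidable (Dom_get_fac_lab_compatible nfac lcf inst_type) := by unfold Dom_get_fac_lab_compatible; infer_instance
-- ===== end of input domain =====

-- B builds the matrix by scattering each lab's 1 into a preallocated zero matrix
-- in one pass over the labs, instead of A's nested per-cell comparison loops (objective: alternative).

-- ===== PORT A =====
-- A: for fac in range(nfac): regional → indicator row over lcf; else → all-ones row.
def get_fac_lab_compatible (nfac : Int) (lcf : List Int) (inst_type : String) : List (List Int) :=
  (PySem.List.pyRange 0 nfac 1).foldl
    (fun d fac =>
      if inst_type == "regional" then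
        d ++ [lcf.foldl (fun row cfac => row ++ [if cfac = fac then 1 else 0]) []]
      else
        d ++ [List.replicate lcf.length 1])
    []

-- ===== PORT B =====
-- B: preallocate a zero matrix, then one pass over enumerate(lcf) scattering the 1s.
def get_fac_lab_compatible_alt (nfac : Int) (lcf : List Int) (inst_type : String) : List (List Int) :=
  if inst_type == "regional" then
    (PySem.List.enumerate lcf 0).foldl
      (fun d p =>
        if 0 ≤ p.2 ∧ p.2 < nfac then
          d.modify p.2.toNat (fun row => row.set p.1.toNat 1)
        else d)
      (List.replicate nfac.toNat (List.replicate lcf.length 0))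
  else
    (List.range nfac.toNat).map (fun _ => List.replicate lcf.length 1)

-- ===== PRECONDITION & SPEC =====
def Spec_get_fac_lab_compatible (nfac : Int) (lcf : List Int) (inst_type : String) (out : List (List Int)) : Prop := out = get_fac_lab_compatible_alt nfac lcf inst_type
instance (nfac : Int) (lcf : List Int) (inst_type : String) (out : List (List Int)) : Decidable (Spec_get_fac_lab_compatible nfac lcf inst_type out) := by unfold Spec_get_fac_lab_compatible; infer_instance

-- ===== CLAIM (what is proved, stated in full; the proofs are below) =====
def Claim_equal_get_fac_lab_compatible : Prop := ∀ (nfac : Int) (lcf : List Int) (inst_type : String), Dom_get_fac_lab_compatible nfac lcf inst_type → Spec_get_fac_lab_compatible nfac lcf inst_type (get_fac_lab_compatible nfac lcf inst_type)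

-- ===== LEMMAS AND PROOFS =====

-- Appending-one-by-one fold is a map.
theorem pvFoldlPush {α β : Type} (f : α → β) :
    ∀ (l : List α) (acc : List β), l.foldl (fun a x => a ++ [f x]) acc = acc ++ l.map f := by
  intro l
  induction l with
  | nil => simp
  | cons x xs ih => intro acc; simp [List.foldl_cons, ih]

-- A's result is a map over the range.
theorem pvA_eq (nfac : Int) (lcf : List Int) (inst_type : String) :
    get_fac_lab_compatible nfac lcf inst_type =
      (List.range nfac.toNat).map (fun (k : Nat) =>
        if inst_type == "regional" then
          lcf.map (fun c => if c = (k : Int) then 1 else 0)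
        else List.replicate lcf.length 1) := by
  unfold get_fac_lab_compatible
  rw [PySem.List.pyRange_one, List.foldl_map]
  simp only [Int.sub_zero, Int.zero_add]
  by_cases h : inst_type == "regional" <;>
    simp only [h, if_true, Bool.false_eq_true, if_false] <;>
    rw [pvFoldlPush, List.nil_append]
  apply List.map_congr_left
  intro k _
  rw [pvFoldlPush, List.nil_append]

-- Scatter step preserves the number of rows.
theorem pvScatterLength (nfac : Int) :
    ∀ (P : List (Int × Int)) (d : List (List Int)),
      (P.foldl (fun d p =>
        if 0 ≤ p.2 ∧ p.2 < nfac then d.modify p.2.toNat (fun row => row.set p.1.toNat 1) else d) d).length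
      = d.length := by
  intro P
  induction P with
  | nil => intro d; rfl
  | cons p Ps ih =>
    intro d
    simp only [List.foldl_cons]
    rw [ih]
    split <;> simp

-- Row i of the scattered matrix is the per-row fold on row i.
theorem pvScatterRow (nfac : Int) :
    ∀ (P : List (Int × Int)) (d : List (List Int)) (i : Nat) (row0 : List Int),
      i < d.length → (i : Int) < nfac → d[i]? = some row0 →
      (P.foldl (fun d p =>
        if 0 ≤ p.2 ∧ p.2 < nfac then d.modify p.2.toNat (fun row => row.set p.1.toNat 1) else d) d)[i]?
      = some (P.foldl (fun row p => if p.2 = (i : Int) then row.set p.1.toNat 1 else row) row0) := by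
  intro P
  induction P with
  | nil => intro d i row0 hi hn hrow; simpa using hrow
  | cons p Ps ih =>
    intro d i row0 hi hn hrow
    simp only [List.foldl_cons]
    by_cases hg : 0 ≤ p.2 ∧ p.2 < nfac
    · simp only [if_pos hg]
      apply ih _ i (if p.2 = (i : Int) then row0.set p.1.toNat 1 else row0) (by simpa using hi) hn
      rw [List.getElem?_modify, hrow]
      by_cases he : p.2 = (i : Int)
      · simp [he]
      · have hne : p.2.toNat ≠ i := by omega
        simp [hne, he]
    · have he : p.2 ≠ (i : Int) := by
        intro hcon; apply hg; constructor <;> omega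
      simp only [if_neg hg, if_neg he]
      exact ih _ i row0 hi hn hrow

-- The per-row fold over enumerate builds the indicator row.
theorem pvRowFold (i : Int) :
    ∀ (l : List Int) (s : Nat) (t : List Int), t.length = s →
      (PySem.List.enumerate l (s : Int)).foldl
          (fun row p => if p.2 = i then row.set p.1.toNat 1 else row)
          (t ++ List.replicate l.length 0)
      = t ++ l.map (fun c => if c = i then 1 else 0) := by
  intro l
  induction l with
  | nil => intro s t ht; simp [PySem.List.enumerate_nil]
  | cons c rest ih =>
    intro s t ht
    rw [PySem.List.enumerate_cons]
    simp only [List.foldl_cons]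
    have hset : ∀ v : Int, (t ++ (0 :: List.replicate rest.length 0)).set s v
        = (t ++ [v]) ++ List.replicate rest.length 0 := by
      intro v
      rw [List.set_append]
      simp [ht]
    have hnext : ((s : Int) + 1) = ((s + 1 : Nat) : Int) := by push_cast; ring
    by_cases he : c = i
    · rw [if_pos (by simpa using he)]
      have : ((s : Int)).toNat = s := by omega
      rw [List.length_cons, List.replicate_succ] at *
      rw [this, hset, hnext, ih (s + 1) (t ++ [1]) (by simp [ht])]
      simp [he]
    · rw [if_neg (by simpa using he)]
      rw [List.length_cons, List.replicate_succ]
      have : t ++ (0 :: List.replicate rest.length 0) = (t ++ [0]) ++ List.replicate rest.length 0 := by simp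
      rw [this, hnext, ih (s + 1) (t ++ [0]) (by simp [ht])]
      simp [he]

-- B's regional scatter equals the same map over the range.
theorem pvB_reg (nfac : Int) (lcf : List Int) :
    (PySem.List.enumerate lcf 0).foldl
        (fun d p =>
          if 0 ≤ p.2 ∧ p.2 < nfac then d.modify p.2.toNat (fun row => row.set p.1.toNat 1) else d)
        (List.replicate nfac.toNat (List.replicate lcf.length (0 : Int)))
      = (List.range nfac.toNat).map (fun (k : Nat) => lcf.map (fun c => if c = (k : Int) then 1 else 0)) := by
  apply List.ext_getElem?
  intro i
  by_cases hi : i < nfac.toNat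
  · rw [pvScatterRow nfac _ _ i (List.replicate lcf.length (0 : Int)) (by simpa using hi)
        (by omega) (by simp [hi])]
    rw [List.getElem?_map, List.getElem?_range hi, Option.map_some]
    congr 1
    have := pvRowFold (i : Int) lcf 0 [] rfl
    simpa using this
  · rw [List.getElem?_eq_none (by rw [pvScatterLength]; simpa using Nat.le_of_not_lt hi),
        List.getElem?_eq_none (by simpa using Nat.le_of_not_lt hi)]

-- ===== VERDICT (by name: the statement is the Claim_ definition above) =====
theorem get_fac_lab_compatible_spec : Claim_equal_get_fac_lab_compatible := by
  intro nfac lcf inst_type _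
  unfold Spec_get_fac_lab_compatible
  rw [pvA_eq]
  unfold get_fac_lab_compatible_alt
  by_cases h : inst_type == "regional"
  · simp only [h, if_true]
    rw [pvB_reg]
  · simp [h]
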